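-- pv_equiv track=rewrite | github.com/rodrigorahal/advent-of-code-2015 | 06/fire_hazard.py | follow_for_brightness
-- ===== SOURCE A (Python) =====
-- from collections import defaultdict
--
-- def follow_for_brightness(instructions):
--     brightness = defaultdict(int)
--     for cmd, xlo, ylo, xhi, yhi in instructions:
--         for x in range(xlo, xhi + 1):
--             for y in range(ylo, yhi + 1):
--                 if cmd == "on":
--                     brightness[(x, y)] += 1
--                 elif cmd == "off":
--                     brightness[(x, y)] = max(brightness[(x, y)] - 1, 0)
--                 elif cmd == "toggle":
--                     brightness[(x, y)] += 2
--     return brightness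
-- ===== SOURCE B (Python) =====
-- from collections import defaultdict
--
-- def cell_value(instructions, x, y):
--     v = 0
--     for cmd, xlo, ylo, xhi, yhi in instructions:
--         if xlo <= x <= xhi and ylo <= y <= yhi:
--             if cmd == "on":
--                 v += 1
--             elif cmd == "off":
--                 v = max(v - 1, 0)
--             elif cmd == "toggle":
--                 v += 2
--     return v
--
--
-- def follow_for_brightness(instructions):
--     # Cell-major strategy: first collect the distinct touched cells in
--     # first-touch order, then compute each cell's value with one scan of the
--     # instruction list per cell.
--     seen = set()
--     order = []
--     for cmd, xlo, ylo, xhi, yhi in instructions: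
--         if cmd == "on" or cmd == "off" or cmd == "toggle":
--             for x in range(xlo, xhi + 1):
--                 for y in range(ylo, yhi + 1):
--                     if (x, y) not in seen:
--                         seen.add((x, y))
--                         order.append((x, y))
--     brightness = defaultdict(int)
--     for x, y in order:
--         brightness[(x, y)] = cell_value(instructions, x, y)
--     return brightness
-- ===== Notes on version B (the rewrite author's own statement) =====
-- stated objective: alternative
-- what changed: Instruction-major accumulation into a dict is replaced by a cell-major strategy: one pass collects the distinct touched cells in first-touch order, then each cell's brightness is computed by an independent scan of the instruction list with the same clamped updates.
import Mathlib
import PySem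

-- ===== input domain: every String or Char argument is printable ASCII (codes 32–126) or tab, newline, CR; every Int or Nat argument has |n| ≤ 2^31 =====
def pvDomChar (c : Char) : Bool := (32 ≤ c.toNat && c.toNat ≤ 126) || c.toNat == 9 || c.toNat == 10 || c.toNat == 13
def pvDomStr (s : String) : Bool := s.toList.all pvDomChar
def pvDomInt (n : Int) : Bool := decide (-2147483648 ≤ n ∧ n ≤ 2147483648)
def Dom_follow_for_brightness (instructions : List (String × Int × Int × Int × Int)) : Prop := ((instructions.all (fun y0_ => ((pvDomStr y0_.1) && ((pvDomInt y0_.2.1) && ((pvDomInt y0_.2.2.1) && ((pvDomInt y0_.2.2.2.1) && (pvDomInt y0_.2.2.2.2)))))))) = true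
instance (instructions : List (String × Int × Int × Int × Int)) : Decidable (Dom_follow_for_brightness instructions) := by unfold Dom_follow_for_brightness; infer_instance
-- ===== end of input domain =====

-- B replaces A's instruction-major dict accumulation by a cell-major strategy
-- (collect the touched cells in first-touch order, then value each cell by an
-- independent scan of the instruction list); objective: alternative.

-- ===== PORT A =====
-- one instruction of A's outer loop: the two nested range loops over the rectangle
def fbInstA (d : PySem.Dict (Int × Int) Int) (inst : String × Int × Int × Int × Int) :
    PySem.Dict (Int × Int) Int :=
  match inst with
  | (cmd, xlo, ylo, xhi, yhi) =>
    (PySem.List.pyRange xlo (xhi + 1) 1).foldl (fun d x =>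
      (PySem.List.pyRange ylo (yhi + 1) 1).foldl (fun d y =>
        if cmd == "on" then d.insert (x, y) (d.getD (x, y) 0 + 1)
        else if cmd == "off" then d.insert (x, y) (max (d.getD (x, y) 0 - 1) 0)
        else if cmd == "toggle" then d.insert (x, y) (d.getD (x, y) 0 + 2)
        else d) d) d

def follow_for_brightness (instructions : List (String × Int × Int × Int × Int)) : List (Int × Int × Int) :=
  ((instructions.foldl fbInstA PySem.Dict.empty).items).map (fun p => (p.1.1, p.1.2, p.2))

-- ===== PORT B =====
def cell_value (instructions : List (String × Int × Int × Int × Int)) (x y : Int) : Int :=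
  instructions.foldl (fun v inst =>
    match inst with
    | (cmd, xlo, ylo, xhi, yhi) =>
      if xlo ≤ x ∧ x ≤ xhi ∧ ylo ≤ y ∧ y ≤ yhi then
        if cmd == "on" then v + 1
        else if cmd == "off" then max (v - 1) 0
        else if cmd == "toggle" then v + 2
        else v
      else v) 0

-- one instruction of B's collection loop: (seen, order) over the rectangle
def fbInstB (st : PySem.Set (Int × Int) × List (Int × Int)) (inst : String × Int × Int × Int × Int) :
    PySem.Set (Int × Int) × List (Int × Int) :=
  match inst with
  | (cmd, xlo, ylo, xhi, yhi) =>
    if cmd == "on" || cmd == "off" || cmd == "toggle" then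
      (PySem.List.pyRange xlo (xhi + 1) 1).foldl (fun st x =>
        (PySem.List.pyRange ylo (yhi + 1) 1).foldl (fun st y =>
          if st.1.contains (x, y) then st
          else (PySem.Set.add st.1 (x, y), st.2 ++ [(x, y)])) st) st
    else st

def follow_for_brightness_alt (instructions : List (String × Int × Int × Int × Int)) : List (Int × Int × Int) :=
  ((instructions.foldl fbInstB (PySem.Set.empty, [])).2).map
    (fun c => (c.1, c.2, cell_value instructions c.1 c.2))

-- ===== PRECONDITION & SPEC =====
def Spec_follow_for_brightness (instructions : List (String × Int × Int × Int × Int)) (out : List (Int × Int × Int)) : Prop := out = follow_for_brightness_alt instructions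
instance (instructions : List (String × Int × Int × Int × Int)) (out : List (Int × Int × Int)) : Decidable (Spec_follow_for_brightness instructions out) := by unfold Spec_follow_for_brightness; infer_instance

-- ===== CLAIM (what is proved, stated in full; the proofs are below) =====
def Claim_equal_follow_for_brightness : Prop := ∀ (instructions : List (String × Int × Int × Int × Int)), Dom_follow_for_brightness instructions → Spec_follow_for_brightness instructions (follow_for_brightness instructions)

-- ===== LEMMAS AND PROOFS =====

-- the cells of one rectangle, in the order both loops visit them
def fbCells (xlo ylo xhi yhi : Int) : List (Int × Int) :=
  (PySem.List.pyRange xlo (xhi + 1) 1).flatMap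
    (fun x => (PySem.List.pyRange ylo (yhi + 1) 1).map (fun y => (x, y)))

-- the whole stream of touched cells, in touch order
def fbStream (instructions : List (String × Int × Int × Int × Int)) : List (Int × Int) :=
  instructions.flatMap (fun inst =>
    match inst with
    | (cmd, xlo, ylo, xhi, yhi) =>
      if cmd == "on" || cmd == "off" || cmd == "toggle" then fbCells xlo ylo xhi yhi else [])

-- cell_value generalized to an arbitrary start value
def fbValFrom (instructions : List (String × Int × Int × Int × Int)) (c : Int × Int) (v0 : Int) : Int :=
  instructions.foldl (fun v inst =>
    match inst with
    | (cmd, xlo, ylo, xhi, yhi) =>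
      if xlo ≤ c.1 ∧ c.1 ≤ xhi ∧ ylo ≤ c.2 ∧ c.2 ≤ yhi then
        if cmd == "on" then v + 1
        else if cmd == "off" then max (v - 1) 0
        else if cmd == "toggle" then v + 2
        else v
      else v) v0

theorem cell_value_eq_fbValFrom (instructions : List (String × Int × Int × Int × Int)) (x y : Int) :
    cell_value instructions x y = fbValFrom instructions (x, y) 0 := rfl

-- the two nested loops are one loop over the flattened cell list
theorem foldl_nested {σ : Type} (f : σ → (Int × Int) → σ) (xr yr : List Int) (d : σ) :
    xr.foldl (fun d x => yr.foldl (fun d y => f d (x, y)) d) d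
      = (xr.flatMap (fun x => yr.map (fun y => (x, y)))).foldl f d := by
  induction xr generalizing d with
  | nil => rfl
  | cons x xr ih => simp [List.foldl_append, List.foldl_map, ih]

theorem nodup_fbCells (xlo ylo xhi yhi : Int) : (fbCells xlo ylo xhi yhi).Nodup :=
  List.Nodup.product (PySem.List.nodup_pyRange_one xlo (xhi + 1))
    (PySem.List.nodup_pyRange_one ylo (yhi + 1))

theorem mem_fbCells (xlo ylo xhi yhi : Int) (c : Int × Int) :
    c ∈ fbCells xlo ylo xhi yhi ↔ xlo ≤ c.1 ∧ c.1 ≤ xhi ∧ ylo ≤ c.2 ∧ c.2 ≤ yhi := by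
  obtain ⟨x, y⟩ := c
  show (x, y) ∈ (PySem.List.pyRange xlo (xhi + 1) 1) ×ˢ (PySem.List.pyRange ylo (yhi + 1) 1) ↔ _
  rw [List.mem_product]
  simp [PySem.List.mem_pyRange_one]
  omega

theorem getD_foldl_ins_not_mem (g : PySem.Dict (Int × Int) Int → (Int × Int) → Int)
    (cs : List (Int × Int)) (d : PySem.Dict (Int × Int) Int) (c : Int × Int) (h : c ∉ cs) :
    (cs.foldl (fun d c' => d.insert c' (g d c')) d).getD c 0 = d.getD c 0 := by
  induction cs generalizing d with
  | nil => rfl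
  | cons c' cs ih =>
    simp only [List.mem_cons, not_or] at h
    simp only [List.foldl_cons]
    rw [ih _ h.2, PySem.Dict.getD_insert_of_ne _ _ _ (hne := h.1)]

theorem getD_foldl_ins (g : Int → Int) (cs : List (Int × Int)) (hcs : cs.Nodup)
    (d : PySem.Dict (Int × Int) Int) (c : Int × Int) :
    (cs.foldl (fun d c' => d.insert c' (g (d.getD c' 0))) d).getD c 0
      = if c ∈ cs then g (d.getD c 0) else d.getD c 0 := by
  induction cs generalizing d with
  | nil => simp
  | cons c' cs ih =>
    simp only [List.nodup_cons] at hcs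
    simp only [List.foldl_cons, List.mem_cons]
    by_cases hc : c = c'
    · subst hc
      rw [getD_foldl_ins_not_mem _ _ _ _ hcs.1]
      simp [PySem.Dict.getD_insert_self]
    · rw [ih hcs.2]
      rw [PySem.Dict.getD_insert_of_ne _ _ _ (hne := hc)]
      simp [hc]

theorem fbInstA_eq (cmd : String) (xlo ylo xhi yhi : Int) (d : PySem.Dict (Int × Int) Int) :
    fbInstA d (cmd, xlo, ylo, xhi, yhi)
      = (fbCells xlo ylo xhi yhi).foldl (fun d c =>
          if cmd == "on" then d.insert c (d.getD c 0 + 1)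
          else if cmd == "off" then d.insert c (max (d.getD c 0 - 1) 0)
          else if cmd == "toggle" then d.insert c (d.getD c 0 + 2)
          else d) d := by
  simp only [fbInstA, fbCells]
  exact foldl_nested (f := fun d c =>
    if cmd == "on" then d.insert c (d.getD c 0 + 1)
    else if cmd == "off" then d.insert c (max (d.getD c 0 - 1) 0)
    else if cmd == "toggle" then d.insert c (d.getD c 0 + 2)
    else d) _ _ d

theorem fbInstA_getD (cmd : String) (xlo ylo xhi yhi : Int) (d : PySem.Dict (Int × Int) Int) (c : Int × Int) :
    (fbInstA d (cmd, xlo, ylo, xhi, yhi)).getD c 0 =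
      if xlo ≤ c.1 ∧ c.1 ≤ xhi ∧ ylo ≤ c.2 ∧ c.2 ≤ yhi then
        if cmd == "on" then d.getD c 0 + 1
        else if cmd == "off" then max (d.getD c 0 - 1) 0
        else if cmd == "toggle" then d.getD c 0 + 2
        else d.getD c 0
      else d.getD c 0 := by
  rw [fbInstA_eq]
  by_cases h1 : cmd = "on"
  · simp only [h1, beq_self_eq_true, if_true]
    rw [getD_foldl_ins (fun v => v + 1) _ (nodup_fbCells _ _ _ _) d c]
    simp only [mem_fbCells]
  · by_cases h2 : cmd = "off"
    · simp only [h2, beq_self_eq_true, if_true, show (("off":String) == "on") = false by decide, Bool.false_eq_true, if_false]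
      rw [getD_foldl_ins (fun v => max (v - 1) 0) _ (nodup_fbCells _ _ _ _) d c]
      simp only [mem_fbCells]
    · by_cases h3 : cmd = "toggle"
      · simp only [h3, beq_self_eq_true, if_true, show (("toggle":String) == "on") = false by decide,
          show (("toggle":String) == "off") = false by decide, Bool.false_eq_true, if_false]
        rw [getD_foldl_ins (fun v => v + 2) _ (nodup_fbCells _ _ _ _) d c]
        simp only [mem_fbCells]
      · have b1 : (cmd == "on") = false := by simpa using h1
        have b2 : (cmd == "off") = false := by simpa using h2
        have b3 : (cmd == "toggle") = false := by simpa using h3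
        simp only [b1, b2, b3, Bool.false_eq_true, if_false]
        rw [PySem.List.foldl_ignore]
        simp

theorem fbInstA_keys (cmd : String) (xlo ylo xhi yhi : Int) (d : PySem.Dict (Int × Int) Int) :
    (fbInstA d (cmd, xlo, ylo, xhi, yhi)).keys =
      PySem.Set.update d.keys
        (if cmd == "on" || cmd == "off" || cmd == "toggle" then fbCells xlo ylo xhi yhi else []) := by
  rw [fbInstA_eq]
  by_cases h1 : cmd = "on"
  · simp only [h1, beq_self_eq_true, if_true, Bool.true_or]
    exact PySem.Dict.keys_foldl_insert _ _ _
  · by_cases h2 : cmd = "off"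
    · simp only [h2, beq_self_eq_true, if_true, show (("off":String) == "on") = false by decide, Bool.false_eq_true, if_false, Bool.false_or, Bool.true_or]
      exact PySem.Dict.keys_foldl_insert _ _ _
    · by_cases h3 : cmd = "toggle"
      · simp only [h3, beq_self_eq_true, if_true, show (("toggle":String) == "on") = false by decide,
          show (("toggle":String) == "off") = false by decide, Bool.false_eq_true, if_false, Bool.false_or, Bool.or_true]
        exact PySem.Dict.keys_foldl_insert _ _ _
      · have b1 : (cmd == "on") = false := by simpa using h1
        have b2 : (cmd == "off") = false := by simpa using h2
        have b3 : (cmd == "toggle") = false := by simpa using h3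
        simp only [b1, b2, b3, Bool.false_eq_true, if_false, Bool.false_or]
        rw [PySem.List.foldl_ignore, PySem.Set.update_nil]

theorem fbFoldA_getD (instructions : List (String × Int × Int × Int × Int))
    (d : PySem.Dict (Int × Int) Int) (c : Int × Int) :
    (instructions.foldl fbInstA d).getD c 0 = fbValFrom instructions c (d.getD c 0) := by
  induction instructions generalizing d with
  | nil => rfl
  | cons inst rest ih =>
    obtain ⟨cmd, xlo, ylo, xhi, yhi⟩ := inst
    simp only [List.foldl_cons, fbValFrom] at *
    rw [ih, fbInstA_getD]

theorem fbFoldA_keys (instructions : List (String × Int × Int × Int × Int))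
    (d : PySem.Dict (Int × Int) Int) :
    (instructions.foldl fbInstA d).keys = PySem.Set.update d.keys (fbStream instructions) := by
  induction instructions generalizing d with
  | nil => rw [List.foldl_nil, fbStream, List.flatMap_nil, PySem.Set.update_nil]
  | cons inst rest ih =>
    obtain ⟨cmd, xlo, ylo, xhi, yhi⟩ := inst
    rw [List.foldl_cons, ih, fbInstA_keys]
    simp only [fbStream, List.flatMap_cons]
    rw [PySem.Set.update_append]

theorem fbPairFold (cs : List (Int × Int)) (s : PySem.Set (Int × Int)) :
    cs.foldl (fun st (c : Int × Int) =>
        if st.1.contains c then st else (PySem.Set.add st.1 c, st.2 ++ [c]))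
      ((s, s) : PySem.Set (Int × Int) × List (Int × Int))
      = (PySem.Set.update s cs, PySem.Set.update s cs) := by
  induction cs generalizing s with
  | nil => rw [PySem.Set.update_nil, List.foldl_nil]
  | cons c cs ih =>
    rw [List.foldl_cons, PySem.Set.update_cons]
    by_cases h : c ∈ s
    · have hc : PySem.Set.contains s c = true := by simpa using h
      simp only [hc, if_true]
      rw [PySem.Set.add_of_mem h]
      exact ih s
    · have hc : PySem.Set.contains s c = false := by simpa using h
      simp only [hc, Bool.false_eq_true, if_false]
      rw [show s ++ [c] = PySem.Set.add s c from (PySem.Set.add_of_not_mem h).symm]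
      exact ih _

theorem fbInstB_eq (cmd : String) (xlo ylo xhi yhi : Int) (s : PySem.Set (Int × Int)) :
    fbInstB (s, s) (cmd, xlo, ylo, xhi, yhi)
      = (PySem.Set.update s (if cmd == "on" || cmd == "off" || cmd == "toggle" then fbCells xlo ylo xhi yhi else []),
         PySem.Set.update s (if cmd == "on" || cmd == "off" || cmd == "toggle" then fbCells xlo ylo xhi yhi else [])) := by
  by_cases ht : (cmd == "on" || cmd == "off" || cmd == "toggle") = true
  · simp only [fbInstB, fbCells, ht, if_true]
    exact (foldl_nested (f := fun st (c : Int × Int) =>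
      if st.1.contains c then st else (PySem.Set.add st.1 c, st.2 ++ [c])) _ _ _).trans (fbPairFold _ s)
  · simp only [fbInstB, ht, Bool.false_eq_true, if_false]
    rw [PySem.Set.update_nil]

theorem fbFoldB (instructions : List (String × Int × Int × Int × Int)) (s : PySem.Set (Int × Int)) :
    instructions.foldl fbInstB ((s, s) : PySem.Set (Int × Int) × List (Int × Int))
      = (PySem.Set.update s (fbStream instructions), PySem.Set.update s (fbStream instructions)) := by
  induction instructions generalizing s with
  | nil => rw [List.foldl_nil, fbStream, List.flatMap_nil, PySem.Set.update_nil]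
  | cons inst rest ih =>
    obtain ⟨cmd, xlo, ylo, xhi, yhi⟩ := inst
    rw [List.foldl_cons, fbInstB_eq, ih]
    simp only [fbStream, List.flatMap_cons]
    rw [PySem.Set.update_append]

-- ===== VERDICT (by name: the statement is the Claim_ definition above) =====
theorem follow_for_brightness_spec : Claim_equal_follow_for_brightness := by
  intro instructions _
  unfold Spec_follow_for_brightness follow_for_brightness follow_for_brightness_alt
  have hkeys : (instructions.foldl fbInstA PySem.Dict.empty).keys
      = PySem.Set.ofList (fbStream instructions) := by
    rw [fbFoldA_keys]
    rw [show (PySem.Dict.empty : PySem.Dict (Int × Int) Int).keys = ([] : List (Int × Int)) from rfl]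
    exact PySem.Set.update_nil_left _
  have hnd : (instructions.foldl fbInstA PySem.Dict.empty).keys.Nodup := by
    rw [hkeys]; exact PySem.Set.nodup_ofList _
  have hb : (instructions.foldl fbInstB ((PySem.Set.empty, []) : PySem.Set (Int × Int) × List (Int × Int))).2
      = PySem.Set.ofList (fbStream instructions) := by
    rw [show ((PySem.Set.empty, []) : PySem.Set (Int × Int) × List (Int × Int))
        = (([] : PySem.Set (Int × Int)), ([] : List (Int × Int))) from rfl]
    rw [fbFoldB]
    exact PySem.Set.update_nil_left _
  rw [PySem.Dict.items_eq_map_keys _ hnd 0, hkeys, hb, List.map_map]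
  refine List.map_congr_left ?_
  intro c _
  have hv : (instructions.foldl fbInstA PySem.Dict.empty).getD c 0 = fbValFrom instructions c 0 := by
    rw [fbFoldA_getD]
    rfl
  simp only [Function.comp, hv, cell_value_eq_fbValFrom]
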